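-- pv_equiv track=rewrite | github.com/janek/casino-blinder | tools/trim_sub.py | trim_signal
-- ===== SOURCE A (Python) =====
-- def calculate_timestamps(raw_data):
--     """Calculate cumulative timestamps for each timing value in microseconds"""
--     timestamps = [0]
--     cumulative = 0
--
--     for timing in raw_data:
--         cumulative += abs(timing)
--         timestamps.append(cumulative)
--
--     return timestamps
--
-- def trim_signal(raw_data, start_us, end_us):
--     """
--     Trim signal to keep only data between start_us and end_us (microseconds)
--
--     Args:
--         raw_data: List of timing values
--         start_us: Start time in microseconds
--         end_us: End time in microseconds (None = end of signal)
--
--     Returns: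
--         Trimmed list of timing values
--     """
--     timestamps = calculate_timestamps(raw_data)
--
--     if end_us is None:
--         end_us = timestamps[-1]
--
--     trimmed = []
--     cumulative = 0
--
--     for i, timing in enumerate(raw_data):
--         next_cumulative = cumulative + abs(timing)
--
--         # Check if this timing overlaps with our trim range
--         if next_cumulative > start_us and cumulative < end_us:
--             # Fully inside range
--             if cumulative >= start_us and next_cumulative <= end_us:
--                 trimmed.append(timing)
--             # Starts before, ends in range
--             elif cumulative < start_us and next_cumulative <= end_us:
--                 remainder = next_cumulative - start_us
--                 trimmed.append(remainder if timing > 0 else -remainder)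
--             # Starts in range, ends after
--             elif cumulative >= start_us and next_cumulative > end_us:
--                 remainder = end_us - cumulative
--                 trimmed.append(remainder if timing > 0 else -remainder)
--             # Spans entire range
--             else:
--                 remainder = end_us - start_us
--                 trimmed.append(remainder if timing > 0 else -remainder)
--
--         cumulative = next_cumulative
--
--         if cumulative >= end_us:
--             break
--
--     return trimmed
-- ===== SOURCE B (Python) =====
-- def trim_signal(raw_data, start_us, end_us):
--     """Trim by phases: skip segments before the window, copy overlapping
--     segments verbatim, then clip the (at most two) boundary segments with
--     the uniform overlap formula min(hi,end)-max(lo,start)."""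
--     total = 0
--     for t in raw_data:
--         total += abs(t)
--     if end_us is None:
--         end_us = total
--     n = len(raw_data)
--     # Phase 1: skip segments that end at or before the window start.
--     k = 0
--     lo = 0
--     while k < n and lo + abs(raw_data[k]) <= start_us:
--         lo += abs(raw_data[k])
--         k += 1
--     # Phase 2: copy segments verbatim while they begin before the window end.
--     out = []
--     c = lo
--     last_lo = lo
--     last_t = 0
--     for t in raw_data[k:]:
--         if c >= end_us:
--             break
--         out.append(t)
--         last_lo = c
--         last_t = t
--         c += abs(t)
--     # Phase 3: clip the boundary segments (first and last of out).
--     if out: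
--         first_t = raw_data[k]
--         r = min(lo + abs(first_t), end_us) - max(lo, start_us)
--         out[0] = r if first_t > 0 else -r
--         r = min(last_lo + abs(last_t), end_us) - max(last_lo, start_us)
--         out[-1] = r if last_t > 0 else -r
--     return out
-- ===== Notes on version B (the rewrite author's own statement) =====
-- stated objective: alternative
-- what changed: A classifies every overlapping segment through a four-branch inside/left-clip/right-clip/span cascade while scanning with an early break; B decomposes the work into three phases: skip segments ending at or before the window start, copy the overlapping segments verbatim while they begin before the window end, then patch only the (at most two) boundary segments with the uniform overlap formula sign(t)*(min(hi,end)-max(lo,start)).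
import Mathlib
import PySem

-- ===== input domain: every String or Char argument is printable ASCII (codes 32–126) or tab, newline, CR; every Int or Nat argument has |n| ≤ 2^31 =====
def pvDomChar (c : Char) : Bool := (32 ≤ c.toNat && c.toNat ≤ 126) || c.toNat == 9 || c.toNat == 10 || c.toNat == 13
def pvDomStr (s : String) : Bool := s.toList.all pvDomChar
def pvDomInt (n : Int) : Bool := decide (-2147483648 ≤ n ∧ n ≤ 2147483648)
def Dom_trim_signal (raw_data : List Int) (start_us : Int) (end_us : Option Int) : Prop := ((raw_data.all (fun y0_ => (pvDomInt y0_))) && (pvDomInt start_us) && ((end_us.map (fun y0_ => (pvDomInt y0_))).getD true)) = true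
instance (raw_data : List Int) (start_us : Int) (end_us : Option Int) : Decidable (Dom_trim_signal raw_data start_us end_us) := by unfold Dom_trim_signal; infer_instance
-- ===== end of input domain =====

-- B replaces A's four-way per-segment classification with early break by a
-- skip / copy-verbatim / patch-the-two-boundary-segments decomposition
-- (objective: alternative; same O(n) cost).

-- ===== PORT A =====
-- helper calculate_timestamps: timestamps = [0]; for timing: cumulative += abs(timing); append
def calculate_timestamps (raw_data : List Int) : List Int :=
  (raw_data.foldl (fun (st : List Int × Int) t =>
      let c := st.2 + |t|
      (st.1 ++ [c], c)) ([0], 0)).1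

-- A's main loop: for timing in raw_data with running cumulative and break
def trimLoopA (start_us end_us : Int) : List Int → Int → List Int
  | [], _ => []
  | t :: ts, c =>
      let nc := c + |t|
      let hd : List Int :=
        if nc > start_us ∧ c < end_us then
          [ if c ≥ start_us ∧ nc ≤ end_us then t
            else if c < start_us ∧ nc ≤ end_us then
              (let r := nc - start_us; if t > 0 then r else -r)
            else if c ≥ start_us ∧ nc > end_us then
              (let r := end_us - c; if t > 0 then r else -r)
            else
              (let r := end_us - start_us; if t > 0 then r else -r) ]
        else []
      hd ++ (if c + |t| ≥ end_us then [] else trimLoopA start_us end_us ts (c + |t|))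

def trim_signal (raw_data : List Int) (start_us : Int) (end_us : Option Int) : List Int :=
  let timestamps := calculate_timestamps raw_data
  -- timestamps[-1]; the list is nonempty by construction, so getD 0 is never taken
  let e := match end_us with
    | none => (PySem.List.pyGet? timestamps (-1)).getD 0
    | some e => e
  trimLoopA start_us e raw_data 0

-- ===== PORT B =====
-- Phase 1 of Source B: while k < n and lo + abs(raw_data[k]) <= start_us: advance.
-- The index k is carried structurally: returns (lo, raw_data[k:]).
def bSkip (start_us : Int) : List Int → Int → Int × List Int
  | [], lo => (lo, [])
  | t :: ts, lo =>
      if lo + |t| ≤ start_us then bSkip start_us ts (lo + |t|) else (lo, t :: ts)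

-- Phase 2 of Source B: copy verbatim while c < end_us, tracking (last_lo, last_t).
def bTake (end_us : Int) : List Int → Int → Int → Int → List Int × Int × Int
  | [], _, last_lo, last_t => ([], last_lo, last_t)
  | t :: ts, c, last_lo, last_t =>
      if c ≥ end_us then ([], last_lo, last_t)
      else (t :: (bTake end_us ts (c + |t|) c t).1, (bTake end_us ts (c + |t|) c t).2)

def trim_signal_alt (raw_data : List Int) (start_us : Int) (end_us : Option Int) : List Int :=
  let total := raw_data.foldl (fun c t => c + |t|) 0
  let e := end_us.getD total
  let (lo, rest) := bSkip start_us raw_data 0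
  let (out, last_lo, last_t) := bTake e rest lo lo 0
  if out.isEmpty then out
  else
    -- raw_data[k] = head of rest (rest is nonempty when out is)
    let first_t := rest.headD 0
    let r1 := min (lo + |first_t|) e - max lo start_us
    let v1 := if first_t > 0 then r1 else -r1
    let r2 := min (last_lo + |last_t|) e - max last_lo start_us
    let v2 := if last_t > 0 then r2 else -r2
    (out.set 0 v1).set (out.length - 1) v2

-- ===== PRECONDITION & SPEC =====
def Spec_trim_signal (raw_data : List Int) (start_us : Int) (end_us : Option Int) (out : List Int) : Prop := out = trim_signal_alt raw_data start_us end_us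
instance (raw_data : List Int) (start_us : Int) (end_us : Option Int) (out : List Int) : Decidable (Spec_trim_signal raw_data start_us end_us out) := by unfold Spec_trim_signal; infer_instance

-- ===== CLAIM (what is proved, stated in full; the proofs are below) =====
def Claim_equal_trim_signal : Prop := ∀ (raw_data : List Int) (start_us : Int) (end_us : Option Int), Dom_trim_signal raw_data start_us end_us → Spec_trim_signal raw_data start_us end_us (trim_signal raw_data start_us end_us)

-- ===== LEMMAS AND PROOFS =====

def sumAbs : List Int → Int
  | [] => 0
  | t :: ts => |t| + sumAbs ts

-- cumulative timestamps after the leading 0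
def cum : List Int → Int → List Int
  | [], _ => []
  | t :: ts, c => (c + |t|) :: cum ts (c + |t|)

-- the clipped value of a segment starting at c
def clip (s e c t : Int) : Int :=
  let r := min (c + |t|) e - max c s
  if t > 0 then r else -r

-- reference: all overlapping segments, clipped, no break
def specF (s e : Int) : List Int → Int → List Int
  | [], _ => []
  | t :: ts, c =>
      (if c + |t| > s ∧ c < e then [clip s e c t] else []) ++ specF s e ts (c + |t|)

-- reference for the post-skip suffix: stop at e, clip everything
def specR (s e : Int) : List Int → Int → List Int
  | [], _ => []
  | t :: ts, c => if c ≥ e then [] else clip s e c t :: specR s e ts (c + |t|)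

theorem calc_ts_fold (l : List Int) (acc : List Int) (c : Int) :
    (l.foldl (fun (st : List Int × Int) t =>
      let c := st.2 + |t|
      (st.1 ++ [c], c)) (acc, c)).1 = acc ++ cum l c := by
  induction l generalizing acc c with
  | nil => simp [cum]
  | cons t ts ih => simp [List.foldl_cons, ih, cum]

theorem cum_last (l : List Int) (c : Int) :
    ((c :: cum l c).getLast?).getD 0 = c + sumAbs l := by
  induction l generalizing c with
  | nil => simp [cum, sumAbs]
  | cons t ts ih =>
      simp only [cum, sumAbs]
      have h := ih (c + |t|)
      simpa [List.getLast?_cons, add_assoc] using h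

theorem foldl_sumAbs (l : List Int) (c : Int) :
    l.foldl (fun c t => c + |t|) c = c + sumAbs l := by
  induction l generalizing c with
  | nil => simp [sumAbs]
  | cons t ts ih => simp only [List.foldl_cons, sumAbs, ih]; ring

-- A-side: the branch cascade equals the uniform clip formula
theorem branch_eq_clip (s e c t : Int) (_h : c + |t| > s ∧ c < e) :
    (if c ≥ s ∧ c + |t| ≤ e then t
     else if c < s ∧ c + |t| ≤ e then
       (let r := c + |t| - s; if t > 0 then r else -r)
     else if c ≥ s ∧ c + |t| > e then
       (let r := e - c; if t > 0 then r else -r)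
     else
       (let r := e - s; if t > 0 then r else -r)) = clip s e c t := by
  rcases le_or_gt t 0 with h0 | h0
  · have habs : |t| = -t := abs_of_nonpos h0
    simp only [clip]
    split_ifs <;> omega
  · have habs : |t| = t := abs_of_pos h0
    simp only [clip]
    split_ifs <;> omega

-- specF vanishes once e ≤ c
theorem specF_stop (s e : Int) (l : List Int) (c : Int) (h : e ≤ c) :
    specF s e l c = [] := by
  induction l generalizing c with
  | nil => simp [specF]
  | cons t ts ih =>
      have := abs_nonneg t
      simp only [specF]
      rw [if_neg (by omega), ih _ (by omega)]
      simp

-- A's loop (with its break) equals specF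
theorem loopA_eq_specF (s e : Int) (l : List Int) (c : Int) :
    trimLoopA s e l c = specF s e l c := by
  induction l generalizing c with
  | nil => simp [trimLoopA, specF]
  | cons t ts ih =>
      simp only [trimLoopA, specF]
      congr 1
      · by_cases h : c + |t| > s ∧ c < e
        · rw [if_pos h, if_pos h, branch_eq_clip s e c t h]
        · rw [if_neg h, if_neg h]
      · by_cases hb : c + |t| ≥ e
        · rw [if_pos hb, specF_stop s e ts _ (by omega)]
        · rw [if_neg hb, ih]

-- skipped segments contribute nothing
theorem bSkip_specF (s e : Int) (l : List Int) (lo : Int) :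
    specF s e l lo = specF s e (bSkip s l lo).2 (bSkip s l lo).1 := by
  induction l generalizing lo with
  | nil => simp [bSkip]
  | cons t ts ih =>
      by_cases h : lo + |t| ≤ s
      · simp only [bSkip, if_pos h, specF]
        rw [if_neg (by omega)]
        simpa using ih (lo + |t|)
      · simp [bSkip, if_neg h]

-- after the skip the head (if any) satisfies lo + |t| > s
theorem bSkip_head (s : Int) (l : List Int) (lo : Int) :
    ∀ t ts, (bSkip s l lo).2 = t :: ts → (bSkip s l lo).1 + |t| > s := by
  induction l generalizing lo with
  | nil => intro t ts h; simp [bSkip] at h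
  | cons u us ih =>
      intro t ts h
      by_cases hu : lo + |u| ≤ s
      · simp only [bSkip, if_pos hu] at h ⊢
        exact ih _ t ts h
      · simp only [bSkip, if_neg hu] at h ⊢
        cases h
        omega

-- specF = specR on the suffix once c > s
theorem specF_eq_specR_of_gt (s e : Int) (l : List Int) (c : Int) (h : s < c) :
    specF s e l c = specR s e l c := by
  induction l generalizing c with
  | nil => simp [specF, specR]
  | cons t ts ih =>
      have ht := abs_nonneg t
      simp only [specF, specR]
      by_cases hc : c ≥ e
      · rw [if_pos hc, if_neg (by omega), specF_stop s e ts _ (by omega)]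
        simp
      · rw [if_neg hc, if_pos (by omega), ih _ (by omega)]
        simp

theorem specF_eq_specR (s e t : Int) (ts : List Int) (c : Int) (h : s < c + |t|) :
    specF s e (t :: ts) c = specR s e (t :: ts) c := by
  have ht := abs_nonneg t
  simp only [specF, specR]
  by_cases hc : c ≥ e
  · rw [if_pos hc, if_neg (by omega), specF_stop s e ts _ (by omega)]
    simp
  · rw [if_neg hc, if_pos (by omega), specF_eq_specR_of_gt s e ts _ (by omega)]
    simp

-- interior segments clip to themselves
theorem clip_id (s e c t : Int) (hs : s < c) (he : c + |t| < e) :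
    clip s e c t = t := by
  rcases le_or_gt t 0 with h0 | h0
  · have habs : |t| = -t := abs_of_nonpos h0
    simp only [clip]; split_ifs <;> omega
  · have habs : |t| = t := abs_of_pos h0
    simp only [clip]; split_ifs <;> omega

theorem bTake_state_of_empty (e : Int) (l : List Int) (c a b : Int)
    (h : (bTake e l c a b).1 = []) : (bTake e l c a b).2 = (a, b) := by
  cases l with
  | nil => simp [bTake]
  | cons t ts =>
      by_cases hc : c ≥ e
      · simp [bTake, if_pos hc]
      · simp [bTake, if_neg hc] at h

theorem bTake_ne_nil_lt (e : Int) (l : List Int) (c a b : Int)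
    (h : (bTake e l c a b).1 ≠ []) : c < e := by
  cases l with
  | nil => simp [bTake] at h
  | cons t ts =>
      by_cases hc : c ≥ e
      · simp [bTake, if_pos hc] at h
      · omega

-- the main B-side lemma: bTake's output, patched at both ends, equals specR
theorem bTake_spec (s e : Int) (l : List Int) (c llo lt : Int)
    (hh : ∀ t ts, l = t :: ts → s < c + |t|) :
    ((bTake e l c llo lt).1 = [] ∧ specR s e l c = []) ∨
    ((bTake e l c llo lt).1 ≠ [] ∧
      specR s e l c =
        ((bTake e l c llo lt).1.set 0 (clip s e c (l.headD 0))).set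
          ((bTake e l c llo lt).1.length - 1)
          (clip s e (bTake e l c llo lt).2.1 (bTake e l c llo lt).2.2)) := by
  induction l generalizing c llo lt with
  | nil => left; simp [bTake, specR]
  | cons t ts ih =>
      by_cases hc : c ≥ e
      · left
        simp [bTake, specR, if_pos hc]
      · right
        have hs : s < c + |t| := hh t ts rfl
        simp only [bTake, if_neg hc, specR, List.headD_cons]
        refine ⟨by simp, ?_⟩
        have ih' := ih (c + |t|) c t (by
          intro t' ts' hts
          have := abs_nonneg t'
          omega)
        rcases ih' with ⟨hout, hspec⟩ | ⟨hout, hspec⟩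
        · -- recursive output empty: out = [t]
          have hst := bTake_state_of_empty e ts (c + |t|) c t hout
          simp [hout, hspec, hst, clip]
        · -- recursive output nonempty
          obtain ⟨o1, os, ho⟩ := List.exists_cons_of_ne_nil hout
          rw [hspec, ho]
          simp only [List.set_cons_zero, List.length_cons, Nat.add_sub_cancel,
            List.set_cons_succ]
          congr 1
          rcases os with _ | ⟨o2, os'⟩
          · -- length-1 recursive output: both sets hit index 0
            simp
          · -- length ≥ 2: the set-0 patch is the identity
            simp only [List.length_cons, List.set_cons_succ]
            cases ts with
            | nil => simp [bTake] at ho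
            | cons t' ts' =>
                have hlt' : ¬ c + |t| ≥ e := by
                  have := bTake_ne_nil_lt e (t' :: ts') (c + |t|) c t hout
                  omega
                have ho' := ho
                simp only [bTake, if_neg hlt', List.cons.injEq] at ho'
                obtain ⟨h1, h2⟩ := ho'
                have hinner : (bTake e ts' (c + |t| + |t'|) (c + |t|) t').1 ≠ [] := by
                  rw [h2]; simp
                have hlt2 := bTake_ne_nil_lt e ts' _ _ _ hinner
                have hX : clip s e (c + |t|) ((t' :: ts').headD 0) = o1 := by
                  simp only [List.headD_cons]
                  rw [← h1]
                  exact clip_id s e (c + |t|) t' (by omega) (by omega)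
                rw [hX]

theorem trim_core (s e : Int) (raw : List Int) :
    trimLoopA s e raw 0 =
      (let (lo, rest) := bSkip s raw 0
       let (out, last_lo, last_t) := bTake e rest lo lo 0
       if out.isEmpty then out
       else
         let first_t := rest.headD 0
         let r1 := min (lo + |first_t|) e - max lo s
         let v1 := if first_t > 0 then r1 else -r1
         let r2 := min (last_lo + |last_t|) e - max last_lo s
         let v2 := if last_t > 0 then r2 else -r2
         (out.set 0 v1).set (out.length - 1) v2) := by
  rw [loopA_eq_specF, bSkip_specF s e raw 0]
  rcases hskip : bSkip s raw 0 with ⟨lo, rest⟩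
  simp only
  cases rest with
  | nil =>
      simp [specF, bTake]
  | cons t ts =>
      have hs : s < lo + |t| := by
        have := bSkip_head s raw 0 t ts (by rw [hskip])
        rw [hskip] at this
        exact this
      rw [specF_eq_specR s e t ts lo hs]
      have hspec := bTake_spec s e (t :: ts) lo lo 0 (by
        intro t' ts' h
        cases h
        exact hs)
      rcases htake : bTake e (t :: ts) lo lo 0 with ⟨out, last_lo, last_t⟩
      rw [htake] at hspec
      rcases hspec with ⟨hout, hspecR⟩ | ⟨hout, hspecR⟩
      · simp only at hout
        subst hout
        simpa using hspecR
      · simp only at hout hspecR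
        rw [hspecR]
        simp [hout, clip]

theorem last_timestamp (raw : List Int) :
    (PySem.List.pyGet? (calculate_timestamps raw) (-1)).getD 0 =
      raw.foldl (fun c t => c + |t|) 0 := by
  have hts : calculate_timestamps raw = 0 :: cum raw 0 := by
    simpa [calculate_timestamps, cum] using calc_ts_fold raw [0] 0
  rw [hts, PySem.List.pyGet?_neg_one, foldl_sumAbs]
  simpa using cum_last raw 0

-- ===== VERDICT (by name: the statement is the Claim_ definition above) =====
theorem trim_signal_spec : Claim_equal_trim_signal := by
  intro raw s e? _
  unfold Spec_trim_signal trim_signal trim_signal_alt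
  cases e? with
  | some e => exact trim_core s e raw
  | none =>
      show trimLoopA s ((PySem.List.pyGet? (calculate_timestamps raw) (-1)).getD 0) raw 0 = _
      rw [last_timestamp raw]
      exact trim_core s _ raw
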